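-- pv_equiv track=rewrite | github.com/Johnny1337PW/CPE2.3Parser | parse.py | add_quoting
-- ===== SOURCE A (Python) =====
-- def add_quoting(s):
--     result = ""
--     idx = 0
--     embedded = False
--     while idx < len(s):
--         c = s[idx]
--         if c.isalnum() or c == "_":
--             result = result+c
--             idx = idx + 1
--             embedded = True
--             continue
--         elif c=="\\":
--             result = result+s[idx:idx+1]
--             idx = idx + 1
--             embedded = True
--             continue
--         elif c=="*":
--             if idx == 0 or idx == len(s)-1:
--                 result = result + c
--                 idx = idx+1
--                 embedded = True
--                 continue
--             else:
--                 raise ValueError()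
--         elif c=="?":
--             if (idx == 0) or (idx == len(s)-1) or (not embedded and s[idx-1]=="?") or (embedded and s[idx+1]=="?"):
--                 result = result+c
--                 idx = idx+1
--                 embedded = False
--                 continue
--             else:
--                 raise ValueError()
--         result = result + "\\" + c
--         idx = idx+1
--         embedded = True
--     return result
-- ===== SOURCE B (Python) =====
-- def add_quoting(s):
--     n = len(s)
--     # pass 1: validate wildcard placement
--     for i, c in enumerate(s):
--         if c == '*':
--             if not (i == 0 or i == n - 1):
--                 raise ValueError()
--         elif c == '?':
--             if not (i == 0 or i == n - 1 or s[i - 1] == '?' or s[i + 1] == '?'):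
--                 raise ValueError()
--     # pass 2: build quoted string
--     return ''.join(c if (c.isalnum() or c in '_\\*?') else '\\' + c for c in s)
-- ===== Notes on version B (the rewrite author's own statement) =====
-- stated objective: simpler
-- what changed: Replaces A's single interwoven loop with mutable result/idx/embedded state by a validate-then-build two-pass: a validation scan whose question-mark rule (previous or next char is also a question mark) eliminates the maintained embedded flag, then a join over a per-char quoting expression.
import Mathlib
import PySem

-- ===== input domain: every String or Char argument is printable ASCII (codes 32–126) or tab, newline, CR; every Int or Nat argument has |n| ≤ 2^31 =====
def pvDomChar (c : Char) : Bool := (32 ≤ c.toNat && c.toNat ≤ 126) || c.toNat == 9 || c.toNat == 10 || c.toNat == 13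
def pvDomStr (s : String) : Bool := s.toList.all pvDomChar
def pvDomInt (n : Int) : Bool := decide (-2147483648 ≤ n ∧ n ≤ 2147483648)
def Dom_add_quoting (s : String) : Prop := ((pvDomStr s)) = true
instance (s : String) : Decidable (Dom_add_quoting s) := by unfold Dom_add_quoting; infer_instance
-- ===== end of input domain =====

-- B rewrites A's single interwoven loop (result/idx/embedded state) as a validate-then-build
-- two-pass; objective: simpler.

-- ===== PORT A =====
-- A's while loop over idx with accumulated result and the 'embedded' flag; 'none' marks
-- 'raise ValueError()' (those inputs are excluded by Pre_). c.isalnum() on the printable-ASCII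
-- domain is exactly Char.isAlphanum; s[idx:idx+1] with idx < len(s) is exactly [c].
def aGo (cs : List Char) (idx : Nat) (result : List Char) (embedded : Bool) :
    Option (List Char) :=
  if h : idx < cs.length then
    let c := cs[idx]
    if c.isAlphanum || c == '_' then aGo cs (idx + 1) (result ++ [c]) true
    else if c == '\\' then aGo cs (idx + 1) (result ++ [c]) true
    else if c == '*' then
      if idx == 0 || idx == cs.length - 1 then aGo cs (idx + 1) (result ++ [c]) true
      else none
    else if c == '?' then
      if idx == 0 || idx == cs.length - 1 || (!embedded && cs.getD (idx - 1) ' ' == '?')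
          || (embedded && cs.getD (idx + 1) ' ' == '?') then
        aGo cs (idx + 1) (result ++ [c]) false
      else none
    else aGo cs (idx + 1) (result ++ ['\\', c]) true
  else some result
termination_by cs.length - idx

-- where the Python A raises ValueError (outside Pre_), the port returns "".
def add_quoting (s : String) : String := ((aGo s.toList 0 [] false).getD []).asString

-- ===== PORT B =====
-- B's pass 1: the per-index wildcard-placement check.
def validAt (cs : List Char) (i : Nat) : Bool :=
  let c := cs.getD i ' '
  if c == '*' then i == 0 || i == cs.length - 1
  else if c == '?' then
    i == 0 || i == cs.length - 1 || cs.getD (i - 1) ' ' == '?' || cs.getD (i + 1) ' ' == '?'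
  else true

-- B's pass 2: the per-char quoting expression inside the join.
def encodeChar (c : Char) : List Char :=
  if c.isAlphanum || c == '_' || c == '\\' || c == '*' || c == '?' then [c] else ['\\', c]

-- where the Python B raises ValueError (outside Pre_), the port returns "".
def add_quoting_alt (s : String) : String :=
  let cs := s.toList
  if (List.range cs.length).all (validAt cs) then (cs.flatMap encodeChar).asString else ""

-- ===== PRECONDITION & SPEC =====
-- Pre_ excludes exactly the inputs on which A raises ValueError: an embedded '*' (not first or
-- last), or a '?' that is neither first, last, nor adjacent to another '?'. B raises ValueError
-- on exactly the same inputs.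
def PreL (cs : List Char) : Prop :=
  ∀ i, i < cs.length →
    (cs.getD i ' ' = '*' → i = 0 ∨ i = cs.length - 1) ∧
    (cs.getD i ' ' = '?' →
      i = 0 ∨ i = cs.length - 1 ∨ cs.getD (i - 1) ' ' = '?' ∨ cs.getD (i + 1) ' ' = '?')

def Pre_add_quoting (s : String) : Prop := PreL s.toList
instance (s : String) : Decidable (Pre_add_quoting s) := by
  unfold Pre_add_quoting PreL; infer_instance

def pvWitness_add_quoting : String := "*a-b.c??d*"

def Spec_add_quoting (s : String) (out : String) : Prop := out = add_quoting_alt s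
instance (s : String) (out : String) : Decidable (Spec_add_quoting s out) := by
  unfold Spec_add_quoting; infer_instance

-- ===== CLAIM (what is proved, stated in full; the proofs are below) =====
def Claim_equal_add_quoting : Prop :=
  ∀ (s : String), Dom_add_quoting s → Pre_add_quoting s → Spec_add_quoting s (add_quoting s)

-- ===== LEMMAS AND PROOFS =====

-- A's 'embedded' flag as a function of the position: false at 0, else 'previous char ≠ ?'.
def embOf (cs : List Char) (idx : Nat) : Bool :=
  decide (idx ≠ 0) && !(cs.getD (idx - 1) ' ' == '?')

theorem aGo_eq (cs : List Char) (hPre : PreL cs) :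
    ∀ fuel idx result, cs.length - idx ≤ fuel →
      aGo cs idx result (embOf cs idx) =
        some (result ++ (cs.drop idx).flatMap encodeChar) := by
  intro fuel
  induction fuel with
  | zero =>
    intro idx result hf
    have hge : cs.length ≤ idx := by omega
    rw [aGo]
    simp [Nat.not_lt.mpr hge, List.drop_eq_nil_of_le hge]
  | succ n ih =>
    intro idx result hf
    by_cases h : idx < cs.length
    · have hdrop : cs.drop idx = cs[idx] :: cs.drop (idx + 1) :=
        List.drop_eq_getElem_cons h
      have hgetD : cs.getD idx ' ' = cs[idx] := List.getD_eq_getElem cs ' ' h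
      have hemb1 : ∀ b : Bool, (cs[idx] == '?') = !b → embOf cs (idx + 1) = b := by
        intro b hb
        unfold embOf
        rw [Nat.add_sub_cancel, hgetD, hb]
        simp
      have hfm : List.flatMap encodeChar (List.drop idx cs) =
          encodeChar cs[idx] ++ List.flatMap encodeChar (List.drop (idx + 1) cs) := by
        rw [hdrop, List.flatMap_cons]
      rw [aGo]
      simp only [dif_pos h]
      obtain ⟨hstar, hq⟩ := hPre idx h
      rw [hgetD] at hstar hq
      by_cases h1 : (cs[idx].isAlphanum || cs[idx] == '_') = true
      · have hne : (cs[idx] == '?') = false := by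
          rcases Bool.or_eq_true _ _ |>.mp h1 with ha | ha
          · cases hc : (cs[idx] == '?')
            · rfl
            · rw [eq_of_beq hc] at ha; exact absurd ha (by decide)
          · rw [eq_of_beq ha]; rfl
        rw [if_pos h1]
        have := ih (idx + 1) (result ++ [cs[idx]]) (by omega)
        rw [hemb1 true (by simp [hne])] at this
        rw [this, hfm]
        have henc : encodeChar cs[idx] = [cs[idx]] := by
          unfold encodeChar
          rcases Bool.or_eq_true _ _ |>.mp h1 with ha | ha <;> simp [ha]
        rw [henc]; simp
      · rw [if_neg h1]
        by_cases h2 : (cs[idx] == '\\') = true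
        · rw [if_pos h2]
          have := ih (idx + 1) (result ++ [cs[idx]]) (by omega)
          rw [hemb1 true (by rw [eq_of_beq h2]; rfl)] at this
          rw [this, hfm]
          have henc : encodeChar cs[idx] = [cs[idx]] := by unfold encodeChar; simp [h2]
          rw [henc]; simp
        · rw [if_neg h2]
          by_cases h3 : (cs[idx] == '*') = true
          · rw [if_pos h3]
            have hpos : (idx == 0 || idx == cs.length - 1) = true := by
              rcases hstar (eq_of_beq h3) with h' | h' <;> simp [h']
            rw [if_pos hpos]
            have := ih (idx + 1) (result ++ [cs[idx]]) (by omega)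
            rw [hemb1 true (by rw [eq_of_beq h3]; rfl)] at this
            rw [this, hfm]
            have henc : encodeChar cs[idx] = [cs[idx]] := by unfold encodeChar; simp [h3]
            rw [henc]; simp
          · rw [if_neg h3]
            by_cases h4 : (cs[idx] == '?') = true
            · rw [if_pos h4]
              have hguard : (idx == 0 || idx == cs.length - 1
                  || (!embOf cs idx && cs.getD (idx - 1) ' ' == '?')
                  || (embOf cs idx && cs.getD (idx + 1) ' ' == '?')) = true := by
                rcases hq (eq_of_beq h4) with h' | h' | h' | h'
                · simp [h']
                · simp [h']
                · by_cases h0 : idx = 0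
                  · simp [h0]
                  · rw [List.getD_eq_getElem?_getD] at h'
                    simp [embOf, h0, h', List.getD_eq_getElem?_getD]
                · by_cases h0 : idx = 0
                  · simp [h0]
                  · by_cases hp : cs.getD (idx - 1) ' ' = '?'
                    · rw [List.getD_eq_getElem?_getD] at hp
                      simp [embOf, h0, hp, List.getD_eq_getElem?_getD]
                    · rw [List.getD_eq_getElem?_getD] at hp
                      rw [List.getD_eq_getElem?_getD] at h'
                      simp [embOf, h0, hp, h', List.getD_eq_getElem?_getD]
              rw [if_pos hguard]
              have := ih (idx + 1) (result ++ [cs[idx]]) (by omega)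
              rw [hemb1 false (by simp [h4])] at this
              rw [this, hfm]
              have henc : encodeChar cs[idx] = [cs[idx]] := by unfold encodeChar; simp [h4]
              rw [henc]; simp
            · rw [if_neg h4]
              have := ih (idx + 1) (result ++ ['\\', cs[idx]]) (by omega)
              rw [hemb1 true (by simp [h4])] at this
              rw [this, hfm]
              have henc : encodeChar cs[idx] = ['\\', cs[idx]] := by
                unfold encodeChar
                rw [if_neg]
                simp only [Bool.or_eq_true] at h1 ⊢
                intro hcontra
                rcases hcontra with ((((ha | ha) | ha) | ha) | ha)
                · exact h1 (Or.inl ha)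
                · exact h1 (Or.inr ha)
                · exact h2 ha
                · exact h3 ha
                · exact h4 ha
              rw [henc]; simp
    · have hge : cs.length ≤ idx := by omega
      rw [aGo]
      simp [Nat.not_lt.mpr hge, List.drop_eq_nil_of_le hge]

theorem valid_of_pre (cs : List Char) (h : PreL cs) :
    (List.range cs.length).all (validAt cs) = true := by
  rw [List.all_eq_true]
  intro i hi
  rw [List.mem_range] at hi
  obtain ⟨hstar, hq⟩ := h i hi
  unfold validAt
  by_cases h1 : (cs.getD i ' ' == '*') = true
  · rw [if_pos h1]
    rcases hstar (eq_of_beq h1) with h' | h' <;> simp [h']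
  · rw [if_neg h1]
    by_cases h2 : (cs.getD i ' ' == '?') = true
    · rw [if_pos h2]
      rcases hq (eq_of_beq h2) with h' | h' | h' | h' <;>
        [skip; skip; rw [List.getD_eq_getElem?_getD] at h'; rw [List.getD_eq_getElem?_getD] at h'] <;>
        simp [h']
    · rw [if_neg h2]

-- ===== VERDICT (by name: the statement is the Claim_ definition above) =====
theorem add_quoting_spec : Claim_equal_add_quoting := by
  intro s _ hPre
  unfold Spec_add_quoting add_quoting add_quoting_alt
  have hPre' : PreL s.toList := hPre
  have h0 : embOf s.toList 0 = false := by simp [embOf]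
  have h := aGo_eq s.toList hPre' s.toList.length 0 [] (by omega)
  rw [h0] at h
  have hv := valid_of_pre s.toList hPre'
  rw [h]
  simp only [Option.getD_some, List.nil_append, List.drop_zero, hv, if_true]
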